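-- pv_equiv track=rewrite | github.com/Evidune/Evidune | core/iteration_helpers.py | _strip_managed_adjustments
-- ===== SOURCE A (Python) =====
-- _MANAGED_ADJUSTMENTS_HEADING = "### Outcome-Backed Adjustments"
--
-- def _strip_managed_adjustments(instructions_body: str) -> str:
--     lines = instructions_body.rstrip().split("\n")
--     output: list[str] = []
--     skipping = False
--
--     for line in lines:
--         if line.strip() == _MANAGED_ADJUSTMENTS_HEADING:
--             skipping = True
--             continue
--         if skipping and line.startswith("## "):
--             skipping = False
--         if not skipping:
--             output.append(line)
--
--     return "\n".join(output).rstrip()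
-- ===== SOURCE B (Python) =====
-- _MANAGED_ADJUSTMENTS_HEADING = "### Outcome-Backed Adjustments"
--
-- def _strip_managed_adjustments(instructions_body: str) -> str:
--     lines = instructions_body.rstrip().split("\n")
--     output: list[str] = []
--     i = 0
--     n = len(lines)
--     while i < n:
--         if lines[i].strip() == _MANAGED_ADJUSTMENTS_HEADING:
--             i += 1
--             while i < n and not lines[i].startswith("## "):
--                 i += 1
--         else:
--             output.append(lines[i])
--             i += 1
--     return "\n".join(output).rstrip()
-- ===== Notes on version B (the rewrite author's own statement) =====
-- stated objective: alternative
-- what changed: Replaced the skipping-flag fold over all lines by an explicit index walk that, on seeing the managed heading, runs an inner loop consuming the whole section up to the next level-2 heading line, so no per-line boolean state is carried.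
import Mathlib
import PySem

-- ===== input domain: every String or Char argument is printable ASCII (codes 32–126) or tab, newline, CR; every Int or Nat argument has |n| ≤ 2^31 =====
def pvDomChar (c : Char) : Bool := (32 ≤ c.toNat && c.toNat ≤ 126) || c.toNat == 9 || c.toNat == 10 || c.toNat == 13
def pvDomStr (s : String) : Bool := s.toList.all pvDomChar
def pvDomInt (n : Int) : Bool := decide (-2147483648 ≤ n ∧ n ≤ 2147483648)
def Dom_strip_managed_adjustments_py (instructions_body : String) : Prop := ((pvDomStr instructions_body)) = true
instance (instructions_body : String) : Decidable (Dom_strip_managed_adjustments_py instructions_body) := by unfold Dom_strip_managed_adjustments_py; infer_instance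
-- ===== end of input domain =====

-- B walks the lines with an explicit index and consumes each managed section in an inner
-- loop instead of carrying a skipping flag; same result, alternative decomposition.

-- ===== PORT A =====
def pvHeading : String := "### Outcome-Backed Adjustments"

def pvAStep (st : List String × Bool) (line : String) : List String × Bool :=
  if PySem.Str.strip line == pvHeading then (st.1, true)
  else
    let sk := if st.2 && PySem.Str.startswith line "## " then false else st.2
    if !sk then (st.1 ++ [line], sk) else (st.1, sk)

-- Python's split("\n") with a nonempty literal separator: split? is always `some`; getD [] only totalizes.
def pvSplitLines (s : String) : List String :=
  (PySem.Str.split? s "\n").getD []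

def strip_managed_adjustments_py (instructions_body : String) : String :=
  let lines := pvSplitLines (PySem.Str.rstrip instructions_body)
  let st := lines.foldl pvAStep ([], false)
  PySem.Str.rstrip (PySem.Str.join "\n" st.1)

-- ===== PORT B =====
-- outer while-loop over the index: structural recursion on the remaining lines;
-- the inner consuming while-loop is the dropWhile over the same terminator predicate.
def pvAltGo : List String → List String
  | [] => []
  | l :: rest =>
    if PySem.Str.strip l == pvHeading then
      pvAltGo (rest.dropWhile (fun x => !PySem.Str.startswith x "## "))
    else
      l :: pvAltGo rest
termination_by ls => ls.length
decreasing_by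
  all_goals first
    | exact Nat.lt_succ_of_le (List.length_dropWhile_le _ _)
    | exact Nat.lt_succ_of_le (Nat.le_refl _)

def strip_managed_adjustments_py_alt (instructions_body : String) : String :=
  let lines := pvSplitLines (PySem.Str.rstrip instructions_body)
  PySem.Str.rstrip (PySem.Str.join "\n" (pvAltGo lines))

-- ===== PRECONDITION & SPEC =====
def Spec_strip_managed_adjustments_py (instructions_body : String) (out : String) : Prop := out = strip_managed_adjustments_py_alt instructions_body
instance (instructions_body : String) (out : String) : Decidable (Spec_strip_managed_adjustments_py instructions_body out) := by unfold Spec_strip_managed_adjustments_py; infer_instance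

-- ===== CLAIM (what is proved, stated in full; the proofs are below) =====
def Claim_equal_strip_managed_adjustments_py : Prop := ∀ (instructions_body : String), Dom_strip_managed_adjustments_py instructions_body → Spec_strip_managed_adjustments_py instructions_body (strip_managed_adjustments_py instructions_body)

-- ===== LEMMAS AND PROOFS =====
theorem pvInv (lines : List String) : ∀ out : List String,
    (lines.foldl pvAStep (out, false)).1 = out ++ pvAltGo lines ∧
    (lines.foldl pvAStep (out, true)).1 =
      out ++ pvAltGo (lines.dropWhile (fun x => !PySem.Str.startswith x "## ")) := by
  induction lines with
  | nil => intro out; simp [pvAltGo]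
  | cons l rest ih =>
    intro out
    refine ⟨?_, ?_⟩ <;>
      by_cases hh : (PySem.Str.strip l == pvHeading) = true <;>
      by_cases hs : PySem.Chars.startswith l.toList ['#', '#', ' '] = true <;>
      simp only [List.foldl_cons, pvAStep, List.dropWhile_cons] <;>
      simp [pvAltGo, hh, hs, (ih out).2,
        (ih (out ++ [l])).1]

-- ===== VERDICT (by name: the statement is the Claim_ definition above) =====
theorem strip_managed_adjustments_py_spec : Claim_equal_strip_managed_adjustments_py := by
  intro ib _
  unfold Spec_strip_managed_adjustments_py strip_managed_adjustments_py strip_managed_adjustments_py_alt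
  simp only [(pvInv (pvSplitLines (PySem.Str.rstrip ib)) ([] : List String)).1, List.nil_append]
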